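-- pv_equiv track=rewrite | github.com/bugbuger97/Baejoon_sol | 백준/Bronze/8958. OX퀴즈/OX퀴즈.py | Return_OX
-- ===== SOURCE A (Python) =====
-- def Return_OX(ox) -> int:
--   flag = []
--   score = 0
--   result = 0
--   for j in ox:
--     if len(flag) >= 1:
--       if flag[0] == 'O' and j == 'O':
--         score += 1
--         result += score
--         flag.append(j)
--     elif j == 'O':
--       score = 1
--       result += score
--       flag.append(j)
--     if j == 'X':
--       score = 0
--       flag = []
--   return result
-- ===== SOURCE B (Python) =====
-- def Return_OX(ox) -> int:
--     total = 0
--     for seg in ox.split('X'):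
--         n = seg.count('O')
--         total += n * (n + 1) // 2
--     return total
-- ===== Notes on version B (the rewrite author's own statement) =====
-- stated objective: faster
-- what changed: Replaces the incremental streak-tracking loop with a flag list by splitting the string at each failure character and adding the closed-form triangular sum n*(n+1)//2 for the count of correct answers in each segment.
import Mathlib
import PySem

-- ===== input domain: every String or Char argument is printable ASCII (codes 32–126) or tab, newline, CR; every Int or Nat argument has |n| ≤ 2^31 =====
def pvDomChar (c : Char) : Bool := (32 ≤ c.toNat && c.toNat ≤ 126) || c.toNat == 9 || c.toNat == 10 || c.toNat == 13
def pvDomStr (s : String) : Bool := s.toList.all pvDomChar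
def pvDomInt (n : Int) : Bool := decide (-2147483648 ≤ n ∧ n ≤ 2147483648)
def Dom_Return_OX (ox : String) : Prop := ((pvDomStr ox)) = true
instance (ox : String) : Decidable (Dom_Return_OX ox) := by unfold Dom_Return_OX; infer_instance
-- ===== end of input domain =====

-- B replaces A's incremental streak loop (flag list + running score) by splitting the string
-- at each failure character and adding the closed-form triangular number n*(n+1)//2 per segment
-- (measurably faster by a constant factor: the per-character Python loop disappears).

-- ===== PORT A =====
-- one iteration of A's loop body over the state (flag, score, result)
def Return_OXStep (st : List Char × Int × Int) (j : Char) : List Char × Int × Int :=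
  let flag := st.1
  let score := st.2.1
  let result := st.2.2
  let st' :=
    if flag.length ≥ 1 then
      if PySem.List.pyGet? flag 0 = some 'O' ∧ j = 'O' then
        (flag ++ [j], score + 1, result + (score + 1))
      else (flag, score, result)
    else if j = 'O' then (flag ++ [j], (1 : Int), result + 1)
    else (flag, score, result)
  if j = 'X' then ([], (0 : Int), st'.2.2) else st'

def Return_OX (ox : String) : Int :=
  (ox.toList.foldl Return_OXStep ([], 0, 0)).2.2

-- ===== PORT B =====
def Return_OX_alt (ox : String) : Int :=
  (PySem.Chars.splitOn ox.toList ['X']).foldl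
    (fun total seg =>
      let n : Int := (PySem.Chars.count seg ['O'] : Int)
      total + PySem.Int.floordiv (n * (n + 1)) 2) 0

-- ===== PRECONDITION & SPEC =====
def Spec_Return_OX (ox : String) (out : Int) : Prop := out = Return_OX_alt ox
instance (ox : String) (out : Int) : Decidable (Spec_Return_OX ox out) := by unfold Spec_Return_OX; infer_instance

-- ===== CLAIM (what is proved, stated in full; the proofs are below) =====
def Claim_equal_Return_OX : Prop := ∀ (ox : String), Dom_Return_OX ox → Spec_Return_OX ox (Return_OX ox)

-- ===== LEMMAS AND PROOFS =====

theorem cons_headI_tail {α : Type} [Inhabited α] (l : List α) (h : l ≠ []) :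
    l.headI :: l.tail = l := by
  cases l
  · exact absurd rfl h
  · rfl

-- structural characterisation of Python's str.split for the one-character separator 'X'
def splitX : List Char → List (List Char)
  | [] => [[]]
  | c :: cs =>
    if c = 'X' then [] :: splitX cs
    else
      match splitX cs with
      | [] => [[c]]
      | s :: ss => (c :: s) :: ss

theorem splitX_ne_nil (cs : List Char) : splitX cs ≠ [] := by
  cases cs with
  | nil => simp [splitX]
  | cons c cs =>
    simp only [splitX]; split_ifs
    · simp
    · cases h : splitX cs <;> simp

theorem splitOn_go_single (fuel : Nat) : ∀ (l cur : List Char) (acc : List (List Char)),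
    l.length ≤ fuel →
    PySem.Chars.splitOn.go ['X'] fuel l cur acc =
      acc.reverse ++ ((cur.reverse ++ (splitX l).headI) :: (splitX l).tail) := by
  induction fuel with
  | zero =>
    intro l cur acc h
    have : l = [] := by cases l <;> simp_all
    subst this
    simp [PySem.Chars.splitOn.go, splitX]
  | succ n ih =>
    intro l cur acc h
    cases l with
    | nil => simp [PySem.Chars.splitOn.go, splitX]
    | cons c rest =>
      rw [PySem.Chars.splitOn.go]
      by_cases hc : c = 'X'
      · subst hc
        rw [if_pos (by simp [List.isPrefixOf])]
        simp only [List.length_cons, List.length_nil, Nat.zero_add, List.drop_succ_cons,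
          List.drop_zero]
        rw [ih rest [] (cur.reverse :: acc) (by simpa using Nat.le_of_succ_le_succ h)]
        simp [splitX, cons_headI_tail _ (splitX_ne_nil rest)]
      · rw [if_neg (by simp [List.isPrefixOf]; intro h'; exact hc h'.symm)]
        rw [ih rest (c :: cur) acc (by simpa using Nat.le_of_succ_le_succ h)]
        cases hs : splitX rest with
        | nil => exact absurd hs (splitX_ne_nil rest)
        | cons s ss => simp [splitX, hc, hs]

theorem splitOn_single (cs : List Char) : PySem.Chars.splitOn cs ['X'] = splitX cs := by
  unfold PySem.Chars.splitOn
  rw [splitOn_go_single (cs.length + 1) cs [] [] (by omega)]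
  simpa using cons_headI_tail _ (splitX_ne_nil cs)

theorem count_go_single (fuel : Nat) : ∀ (l : List Char) (acc : Nat),
    l.length ≤ fuel →
    PySem.Chars.count.go ['O'] fuel l acc = acc + l.count 'O' := by
  induction fuel with
  | zero =>
    intro l acc h
    have : l = [] := by cases l <;> simp_all
    subst this
    simp [PySem.Chars.count.go]
  | succ n ih =>
    intro l acc h
    cases l with
    | nil => simp [PySem.Chars.count.go]
    | cons c rest =>
      rw [PySem.Chars.count.go]
      by_cases hc : c = 'O'
      · subst hc
        rw [if_pos (by simp [List.isPrefixOf])]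
        simp only [List.length_cons, List.length_nil, Nat.zero_add, List.drop_succ_cons,
          List.drop_zero]
        rw [ih rest (acc + 1) (by simpa using Nat.le_of_succ_le_succ h)]
        simp
        omega
      · rw [if_neg (by simp [List.isPrefixOf]; intro h'; exact hc h'.symm)]
        rw [ih rest acc (by simpa using Nat.le_of_succ_le_succ h)]
        simp [hc]

theorem count_single (cs : List Char) : PySem.Chars.count cs ['O'] = cs.count 'O' := by
  unfold PySem.Chars.count
  rw [if_neg (by simp)]
  rw [count_go_single cs.length cs 0 (le_refl _)]
  simp

-- the triangular number n*(n+1)//2 that B adds per segment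
def tri (n : Int) : Int := PySem.Int.floordiv (n * (n + 1)) 2

theorem tri_succ (n : Int) : tri (n + 1) = tri n + (n + 1) := by
  unfold tri
  rcases Int.even_mul_succ_self n with ⟨k, hk⟩
  have h1 : n * (n + 1) = 2 * k := by omega
  have h2 : (n + 1) * (n + 1 + 1) = 2 * (k + (n + 1)) := by ring_nf; ring_nf at h1; omega
  rw [h1, h2, PySem.Int.floordiv_eq_ediv_of_pos (by omega), PySem.Int.floordiv_eq_ediv_of_pos (by omega)]
  omega

theorem tri_zero : tri 0 = 0 := by decide

-- the amount A's loop adds to result when processing cs with a current streak of s 'O's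
def F : List Char → Int → Int
  | [], _ => 0
  | c :: cs, s =>
    if c = 'X' then F cs 0
    else if c = 'O' then (s + 1) + F cs (s + 1)
    else F cs s

theorem loopA (cs : List Char) : ∀ (score result : Int), 0 ≤ score →
    (cs.foldl Return_OXStep (List.replicate score.toNat 'O', score, result)).2.2
      = result + F cs score := by
  induction cs with
  | nil => intro score result _; simp [F]
  | cons c rest ih =>
    intro score result hs
    simp only [List.foldl_cons]
    by_cases hX : c = 'X'
    · subst hX
      have hstep : Return_OXStep (List.replicate score.toNat 'O', score, result) 'X'
          = (List.replicate (0 : Int).toNat 'O', (0 : Int), result) := by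
        unfold Return_OXStep
        by_cases h1 : 1 ≤ score
        · obtain ⟨m, hm⟩ : ∃ m, score.toNat = m + 1 := ⟨score.toNat - 1, by omega⟩
          rw [hm]
          simp
        · have h0 : score.toNat = 0 := by omega
          rw [h0]
          simp
      rw [hstep, ih 0 result (by omega)]
      simp [F]
    · by_cases hO : c = 'O'
      · subst hO
        have hstep : Return_OXStep (List.replicate score.toNat 'O', score, result) 'O'
            = (List.replicate (score + 1).toNat 'O', score + 1, result + (score + 1)) := by
          unfold Return_OXStep
          have he2 : (score + 1).toNat = score.toNat + 1 := by omega
          by_cases h1 : 1 ≤ score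
          · obtain ⟨m, hm⟩ : ∃ m, score.toNat = m + 1 := ⟨score.toNat - 1, by omega⟩
            rw [he2, hm]
            simp [← List.replicate_succ']
          · have h0 : score = 0 := by omega
            subst h0
            simp [List.replicate_succ]
        rw [hstep, ih (score + 1) (result + (score + 1)) (by omega)]
        simp [F]
        ring
      · have hstep : Return_OXStep (List.replicate score.toNat 'O', score, result) c
            = (List.replicate score.toNat 'O', score, result) := by
          unfold Return_OXStep
          by_cases h1 : 1 ≤ score
          · obtain ⟨m, hm⟩ : ∃ m, score.toNat = m + 1 := ⟨score.toNat - 1, by omega⟩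
            rw [hm]
            simp [hO, hX]
          · have h0 : score.toNat = 0 := by omega
            rw [h0]
            simp [hO, hX]
        rw [hstep, ih score result hs]
        simp [F, hX, hO]

theorem splitX_X (cs : List Char) : splitX ('X' :: cs) = [] :: splitX cs := by
  simp [splitX]

theorem splitX_cons (c : Char) (cs : List Char) (hX : c ≠ 'X') (h : List Char)
    (t : List (List Char)) (hrs : splitX cs = h :: t) :
    splitX (c :: cs) = (c :: h) :: t := by
  simp [splitX, hX, hrs]

theorem F_X (cs : List Char) (s : Int) : F ('X' :: cs) s = F cs 0 := by simp [F]

theorem F_O (cs : List Char) (s : Int) : F ('O' :: cs) s = (s + 1) + F cs (s + 1) := by simp [F]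

theorem F_other (c : Char) (cs : List Char) (s : Int) (hX : c ≠ 'X') (hO : c ≠ 'O') :
    F (c :: cs) s = F cs s := by simp [F, hX, hO]

theorem F_eq_split (cs : List Char) : ∀ (s : Int),
    F cs s = tri (s + ((splitX cs).headI.count 'O' : Int)) - tri s
      + ((splitX cs).tail.map (fun seg => tri (seg.count 'O' : Int))).sum := by
  induction cs with
  | nil => intro s; simp [F, splitX]
  | cons c rest ih =>
    intro s
    cases hrs : splitX rest with
    | nil => exact absurd hrs (splitX_ne_nil rest)
    | cons h t =>
      by_cases hX : c = 'X'
      · subst hX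
        rw [F_X, splitX_X, ih 0, hrs]
        simp [tri_zero]
      · by_cases hO : c = 'O'
        · subst hO
          rw [F_O, splitX_cons 'O' rest (by decide) h t hrs, ih (s + 1), hrs]
          simp only [List.headI, List.tail]
          simp only [List.count_cons, BEq.rfl]
          push_cast
          have harr : s + 1 + (h.count 'O' : Int) = s + ((h.count 'O' : Int) + 1) := by ring
          rw [harr, tri_succ s]
          omega
        · rw [F_other c rest s hX hO, splitX_cons c rest hX h t hrs, ih s, hrs]
          simp only [List.headI, List.tail]
          simp [hO]

-- ===== VERDICT (by name: the statement is the Claim_ definition above) =====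
theorem Return_OX_spec : Claim_equal_Return_OX := by
  intro ox _
  unfold Spec_Return_OX Return_OX Return_OX_alt
  have hA : (ox.toList.foldl Return_OXStep ([], 0, 0)).2.2 = 0 + F ox.toList 0 := by
    simpa using loopA ox.toList 0 0 (by omega)
  rw [hA, splitOn_single]
  simp only []
  rw [PySem.List.foldl_add (splitX ox.toList)
    (fun seg => PySem.Int.floordiv ((PySem.Chars.count seg ['O'] : Int) * ((PySem.Chars.count seg ['O'] : Int) + 1)) 2) 0]
  have hmap : (splitX ox.toList).map
      (fun seg => PySem.Int.floordiv ((PySem.Chars.count seg ['O'] : Int) * ((PySem.Chars.count seg ['O'] : Int) + 1)) 2)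
      = (splitX ox.toList).map (fun seg => tri (seg.count 'O' : Int)) := by
    apply List.map_congr_left
    intro seg _
    rw [count_single]
    rfl
  rw [hmap, F_eq_split ox.toList 0, tri_zero]
  cases hs : splitX ox.toList with
  | nil => exact absurd hs (splitX_ne_nil ox.toList)
  | cons h t => simp [List.headI, List.tail]
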